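-- pv_equiv track=rewrite | github.com/sk408/trytry | src/analytics/backtester.py | _get_position_group
-- ===== SOURCE A (Python) =====
-- def _get_position_group(position: str) -> str:
--     """Normalize positions into groups: Guard (G), Forward (F), Center (C)."""
--     pos = position.upper().strip()
--     if not pos:
--         return "F"
--     if pos in ("PG", "SG", "G") or "GUARD" in pos:
--         return "G"
--     if pos in ("SF", "PF", "F") or "FORWARD" in pos:
--         return "F"
--     if pos in ("C",) or "CENTER" in pos:
--         return "C"
--     if "-" in pos:
--         return _get_position_group(pos.split("-")[0])
--     return "F"
-- ===== SOURCE B (Python) =====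
-- EXACT = {"PG": "G", "SG": "G", "G": "G",
--          "SF": "F", "PF": "F", "F": "F",
--          "C": "C"}
-- MARKERS = ["GUARD", "FORWARD", "CENTER"]
-- MARKER_GROUP = {"GUARD": "G", "FORWARD": "F", "CENTER": "C"}
--
--
-- def _classify_once(cand):
--     """Classify one already-normalized candidate: 'F' for empty, flat-dict hit for
--     exact codes, else collect every marker word present and take the highest-priority
--     one; None when nothing applies."""
--     if not cand:
--         return "F"
--     if cand in EXACT:
--         return EXACT[cand]
--     hits = [m for m in MARKERS if m in cand]
--     return MARKER_GROUP[hits[0]] if hits else None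
--
--
-- def _get_position_group(position: str) -> str:
--     pos = position.upper().strip()
--     # the first hyphen segment contains no hyphen, so there are at most two candidates
--     candidates = [pos] if "-" not in pos else [pos, pos.split("-")[0].strip()]
--     for cand in candidates:
--         group = _classify_once(cand)
--         if group is not None:
--             return group
--     return "F"
-- ===== Notes on version B (the rewrite author's own statement) =====
-- stated objective: alternative
-- what changed: Replaces A's recursive per-group early-return chain (three exact-tuple tests interleaved with substring tests) by a flat code-to-group dictionary for exact codes, a collect-then-pick pass that gathers all marker words present and selects the highest-priority one, and an explicit bounded candidate list ([pos] or [pos, stripped first hyphen segment]) instead of recursion.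
import Mathlib
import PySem

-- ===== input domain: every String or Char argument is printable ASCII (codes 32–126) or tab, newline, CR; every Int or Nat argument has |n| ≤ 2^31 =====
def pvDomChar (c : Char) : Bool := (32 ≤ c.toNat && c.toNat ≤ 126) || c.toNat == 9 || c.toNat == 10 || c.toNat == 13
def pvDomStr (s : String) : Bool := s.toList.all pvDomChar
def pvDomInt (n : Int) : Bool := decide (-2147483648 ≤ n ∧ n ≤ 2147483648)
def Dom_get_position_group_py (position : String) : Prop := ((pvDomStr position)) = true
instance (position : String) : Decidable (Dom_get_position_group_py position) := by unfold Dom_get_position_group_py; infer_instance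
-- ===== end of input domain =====

-- B replaces A's recursive per-group branch chain by a flat exact-code dictionary, a
-- collect-then-pick pass over the marker words, and a bounded candidate list; objective: alternative.

-- termination helper for port A (cited in decreasing_by): first hyphen segment is strictly shorter
theorem pvTakeWhile_length_lt {s : List Char} (h : '-' ∈ s) :
    (s.takeWhile (fun c => !(c == '-'))).length < s.length := by
  induction s with
  | nil => cases h
  | cons c rest ih =>
    rw [List.takeWhile_cons]
    by_cases hc : c = '-'
    · simp [hc]
    · have h' : '-' ∈ rest := by
        rcases List.mem_cons.mp h with h'' | h''
        · exact absurd h''.symm hc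
        · exact h''
      have := ih h'
      simp [hc]
      omega

theorem pvStrip_sublist (l : List Char) : (PySem.Chars.strip l).Sublist l := by
  have h1 : (PySem.Chars.lstrip l).Sublist l := List.dropWhile_sublist _
  have h2 : (PySem.Chars.rstrip (PySem.Chars.lstrip l)).Sublist (PySem.Chars.lstrip l) := by
    have := List.dropWhile_sublist (p := PySem.Chars.isspace) (l := (PySem.Chars.lstrip l).reverse)
    simpa [PySem.Chars.rstrip] using (List.reverse_sublist.mpr this)
  exact h2.trans h1

theorem pvGoAcc (sep : List Char) : ∀ (fuel : Nat) (l cur : List Char) (acc : List (List Char)),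
    PySem.Chars.splitOn.go sep fuel l cur acc = acc.reverse ++ PySem.Chars.splitOn.go sep fuel l cur [] := by
  intro fuel
  induction fuel with
  | zero => intro l cur acc; simp [PySem.Chars.splitOn.go]
  | succ f ih =>
    intro l cur acc
    cases l with
    | nil => simp [PySem.Chars.splitOn.go]
    | cons c rest =>
      simp only [PySem.Chars.splitOn.go]
      by_cases hp : sep.isPrefixOf (c :: rest) = true
      · simp only [hp, if_true]
        rw [ih _ _ (cur.reverse :: acc), ih _ _ [cur.reverse]]
        simp
      · simp only [hp, Bool.false_eq_true, if_false]
        rw [ih rest (c :: cur) acc]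

theorem pvGoHead : ∀ (fuel : Nat) (l cur : List Char), l.length ≤ fuel →
    ∃ t, PySem.Chars.splitOn.go ['-'] fuel l cur [] =
      (cur.reverse ++ l.takeWhile (fun c => !(c == '-'))) :: t := by
  intro fuel
  induction fuel with
  | zero =>
    intro l cur h
    have : l = [] := List.eq_nil_of_length_eq_zero (Nat.le_zero.mp h)
    subst this
    exact ⟨[], by simp [PySem.Chars.splitOn.go]⟩
  | succ f ih =>
    intro l cur h
    cases l with
    | nil => exact ⟨[], by simp [PySem.Chars.splitOn.go]⟩
    | cons c rest =>
      simp only [PySem.Chars.splitOn.go]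
      by_cases hc : c = '-'
      · subst hc
        have hp : List.isPrefixOf ['-'] ('-' :: rest) = true := by simp [List.isPrefixOf]
        simp only [hp, if_true]
        rw [pvGoAcc _ f _ _ [cur.reverse]]
        exact ⟨PySem.Chars.splitOn.go ['-'] f rest [] [], by simp [List.takeWhile]⟩
      · have hp : List.isPrefixOf ['-'] (c :: rest) = false := by
          simp only [List.isPrefixOf, Bool.and_eq_false_iff, beq_eq_false_iff_ne, ne_eq]
          exact Or.inl fun hcc => hc hcc.symm
        simp only [hp, Bool.false_eq_true, if_false]
        obtain ⟨t, ht⟩ := ih rest (c :: cur) (by simpa using Nat.le_of_succ_le_succ h)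
        refine ⟨t, ?_⟩
        rw [ht, List.takeWhile_cons]
        simp [hc]

theorem pvSplitOnHead (s : List Char) :
    ∃ t, PySem.Chars.splitOn s ['-'] = (s.takeWhile (fun c => !(c == '-'))) :: t := by
  have := pvGoHead (s.length + 1) s [] (by omega)
  simpa [PySem.Chars.splitOn] using this

-- ===== PORT A =====
def get_position_group_py (position : String) : String :=
  let pos := PySem.Str.strip (PySem.Str.upper position)
  if pos = "" then "F"
  else if (pos = "PG" ∨ pos = "SG" ∨ pos = "G") ∨ PySem.Str.isIn "GUARD" pos = true then "G"
  else if (pos = "SF" ∨ pos = "PF" ∨ pos = "F") ∨ PySem.Str.isIn "FORWARD" pos = true then "F"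
  else if pos = "C" ∨ PySem.Str.isIn "CENTER" pos = true then "C"
  else if PySem.Str.isIn "-" pos = true then
    get_position_group_py (((PySem.Str.split? pos "-").getD []).headD "")
  else "F"
termination_by position.toList.length
decreasing_by
  · -- the recursive argument is the first hyphen segment of pos, strictly shorter than position
    have hmem : '-' ∈ (PySem.Str.strip (PySem.Str.upper position)).toList := by
      have h := PySem.Str.isIn_iff_infix (sub := "-") (s := PySem.Str.strip (PySem.Str.upper position))
      have hinf := h.mp (by assumption)
      have : ['-'] <:+: (PySem.Str.strip (PySem.Str.upper position)).toList := by simpa using hinf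
      exact (List.singleton_sublist.mp this.sublist)
    obtain ⟨t, ht⟩ := pvSplitOnHead (PySem.Str.strip (PySem.Str.upper position)).toList
    have hsplit : PySem.Str.split? (PySem.Str.strip (PySem.Str.upper position)) "-" =
        some (List.map String.ofList (PySem.Chars.splitOn (PySem.Str.strip (PySem.Str.upper position)).toList ['-'])) := by
      simp [PySem.Str.split?, PySem.Chars.split?]
    rw [hsplit]
    simp only [Option.getD_some, ht, List.map_cons, List.headD_cons]
    have hlt := pvTakeWhile_length_lt hmem
    have hle : (PySem.Str.strip (PySem.Str.upper position)).toList.length ≤ position.toList.length := by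
      have := (pvStrip_sublist ((PySem.Str.upper position).toList)).length_le
      simpa [PySem.Str.toList_strip, PySem.Str.toList_upper, PySem.Chars.upper] using this
    simp only [String.toList_ofList]
    omega

-- ===== PORT B =====
def pvEXACT : PySem.Dict String String :=
  PySem.Dict.ofList [("PG", "G"), ("SG", "G"), ("G", "G"),
                     ("SF", "F"), ("PF", "F"), ("F", "F"),
                     ("C", "C")]

def pvMARKERS : List String := ["GUARD", "FORWARD", "CENTER"]

def pvMARKER_GROUP : PySem.Dict String String :=
  PySem.Dict.ofList [("GUARD", "G"), ("FORWARD", "F"), ("CENTER", "C")]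

def pvClassifyOnce (cand : String) : Option String :=
  if cand = "" then some "F"
  else
    match PySem.Dict.get? pvEXACT cand with
    | some g => some g
    | none =>
      match pvMARKERS.filter (fun m => PySem.Str.isIn m cand) with
      | m :: _ => PySem.Dict.get? pvMARKER_GROUP m   -- MARKER_GROUP[hits[0]]: key always present
      | [] => none

def pvCandLoop : List String → String
  | [] => "F"
  | cand :: rest =>
    match pvClassifyOnce cand with
    | some g => g
    | none => pvCandLoop rest

def get_position_group_py_alt (position : String) : String :=
  let pos := PySem.Str.strip (PySem.Str.upper position)
  let candidates :=
    if PySem.Str.isIn "-" pos = true then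
      [pos, PySem.Str.strip (((PySem.Str.split? pos "-").getD []).headD "")]
    else [pos]
  pvCandLoop candidates

-- ===== PRECONDITION & SPEC =====
def Spec_get_position_group_py (position : String) (out : String) : Prop := out = get_position_group_py_alt position
instance (position : String) (out : String) : Decidable (Spec_get_position_group_py position out) := by unfold Spec_get_position_group_py; infer_instance

-- ===== CLAIM (what is proved, stated in full; the proofs are below) =====
def Claim_equal_get_position_group_py : Prop := ∀ (position : String), Dom_get_position_group_py position → Spec_get_position_group_py position (get_position_group_py position)

-- ===== LEMMAS AND PROOFS =====

-- A's branch chain as an Option-valued classifier (proof-only helper)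
def pvChain (q : String) : Option String :=
  if q = "" then some "F"
  else if (q = "PG" ∨ q = "SG" ∨ q = "G") ∨ PySem.Str.isIn "GUARD" q = true then some "G"
  else if (q = "SF" ∨ q = "PF" ∨ q = "F") ∨ PySem.Str.isIn "FORWARD" q = true then some "F"
  else if q = "C" ∨ PySem.Str.isIn "CENTER" q = true then some "C"
  else none

theorem pvChainElim (q : String) (e : String) :
    (if q = "" then "F"
     else if (q = "PG" ∨ q = "SG" ∨ q = "G") ∨ PySem.Str.isIn "GUARD" q = true then "G"
     else if (q = "SF" ∨ q = "PF" ∨ q = "F") ∨ PySem.Str.isIn "FORWARD" q = true then "F"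
     else if q = "C" ∨ PySem.Str.isIn "CENTER" q = true then "C"
     else e) =
      (match pvChain q with
       | some g => g
       | none => e) := by
  unfold pvChain
  split_ifs <;> rfl

theorem pvUpperCharFix (c : Char) :
    PySem.Chars.upperChar (PySem.Chars.upperChar c) = PySem.Chars.upperChar c := by
  by_cases h : PySem.Chars.islower c = true
  · have h1 : 'a' ≤ c ∧ c ≤ 'z' := by simpa [PySem.Chars.islower] using h
    have hlo : 97 ≤ c.toNat ∧ c.toNat ≤ 122 := ⟨h1.1, h1.2⟩
    have hval : (c.toNat - 32).isValidChar := by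
      unfold Nat.isValidChar; omega
    have htn : (Char.ofNat (c.toNat - 32)).toNat = c.toNat - 32 := by
      rw [Char.toNat_ofNat, if_pos hval]
    have : PySem.Chars.islower (Char.ofNat (c.toNat - 32)) = false := by
      simp only [PySem.Chars.islower, Bool.and_eq_false_iff, decide_eq_false_iff_not]
      left
      intro hcon
      have h97 : 97 ≤ (Char.ofNat (c.toNat - 32)).toNat := hcon
      omega
    simp [PySem.Chars.upperChar, h, this]
  · have h' : PySem.Chars.islower c = false := by simpa using h
    simp [PySem.Chars.upperChar, h']

theorem pvUpperFixOfMemUpper {c : Char} {l : List Char} (h : c ∈ PySem.Chars.upper l) :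
    PySem.Chars.upperChar c = c := by
  obtain ⟨d, _, hd⟩ := List.mem_map.mp h
  rw [← hd]
  exact pvUpperCharFix d

theorem pvUpperEqSelf {l : List Char} (h : ∀ c ∈ l, PySem.Chars.upperChar c = c) :
    PySem.Chars.upper l = l := by
  unfold PySem.Chars.upper
  rw [List.map_congr_left h]
  simp

theorem pvIsInHyphenIff (s : String) : PySem.Str.isIn "-" s = true ↔ '-' ∈ s.toList := by
  rw [PySem.Str.isIn_iff_infix]
  constructor
  · intro h
    have : ['-'] <:+: s.toList := by simpa using h
    exact List.singleton_sublist.mp this.sublist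
  · intro h
    obtain ⟨pre, suf, hps⟩ := List.append_of_mem h
    have : ['-'] <:+: s.toList := ⟨pre, suf, by simpa using hps.symm⟩
    simpa using this

-- B's single-candidate step computes A's chain (the exact codes are too short to
-- contain any marker word, so the flat dict commutes with A's branch order)
theorem pvStepEq (q : String) : pvClassifyOnce q = pvChain q := by
  by_cases hq : q = ""
  · simp [pvClassifyOnce, pvChain, hq]
  · rcases (by decide : pvEXACT = PySem.Dict.mk [("PG", "G"), ("SG", "G"), ("G", "G"),
        ("SF", "F"), ("PF", "F"), ("F", "F"), ("C", "C")]) with hE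
    by_cases h1 : q = "PG"; · subst h1; decide
    by_cases h2 : q = "SG"; · subst h2; decide
    by_cases h3 : q = "G";  · subst h3; decide
    by_cases h4 : q = "SF"; · subst h4; decide
    by_cases h5 : q = "PF"; · subst h5; decide
    by_cases h6 : q = "F";  · subst h6; decide
    by_cases h7 : q = "C";  · subst h7; decide
    have hnone : PySem.Dict.get? pvEXACT q = none := by
      rw [hE]
      simp only [PySem.Dict.get?_mk_cons, beq_iff_eq]
      rw [if_neg (fun h => h1 h.symm), if_neg (fun h => h2 h.symm), if_neg (fun h => h3 h.symm),
          if_neg (fun h => h4 h.symm), if_neg (fun h => h5 h.symm), if_neg (fun h => h6 h.symm),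
          if_neg (fun h => h7 h.symm)]
      rfl
    simp only [pvClassifyOnce, pvChain, hq, if_false, hnone, pvMARKERS, List.filter]
    by_cases g1 : PySem.Str.isIn "GUARD" q = true
    · simp only [g1, if_true, or_true]
      rfl
    · have g1' : PySem.Str.isIn "GUARD" q = false := by simpa using g1
      simp only [g1', Bool.false_eq_true, if_false, h1, h2, h3, or_false]
      by_cases g2 : PySem.Str.isIn "FORWARD" q = true
      · simp only [g2, if_true, or_true]
        rfl
      · have g2' : PySem.Str.isIn "FORWARD" q = false := by simpa using g2
        simp only [g2', Bool.false_eq_true, if_false, h4, h5, h6, or_false]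
        by_cases g3 : PySem.Str.isIn "CENTER" q = true
        · simp only [g3, if_true, or_true]
          rfl
        · have g3' : PySem.Str.isIn "CENTER" q = false := by simpa using g3
          simp only [g3', Bool.false_eq_true, if_false, h7, or_false]

-- A's value equals B's value
theorem pvMain (position : String) :
    get_position_group_py position = get_position_group_py_alt position := by
  rw [get_position_group_py.eq_def]
  simp only [get_position_group_py_alt]
  set pos := PySem.Str.strip (PySem.Str.upper position) with hpos
  rw [pvChainElim]
  by_cases hd : PySem.Str.isIn "-" pos = true
  · simp only [hd, if_true, pvCandLoop, pvStepEq]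
    cases hc : pvChain pos with
    | some g => rfl
    | none =>
      -- both sides now classify the first hyphen segment
      obtain ⟨t, ht⟩ := pvSplitOnHead pos.toList
      have hsplit : PySem.Str.split? pos "-" =
          some (List.map String.ofList (PySem.Chars.splitOn pos.toList ['-'])) := by
        simp [PySem.Str.split?, PySem.Chars.split?]
      rw [hsplit]
      simp only [Option.getD_some, ht, List.map_cons, List.headD_cons]
      set tw := pos.toList.takeWhile (fun c => !(c == '-')) with htw
      -- the segment is upper-fixed, so A's inner upper().strip() is B's strip()
      have hupfix : ∀ c ∈ tw, PySem.Chars.upperChar c = c := by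
        intro c hcmem
        have hcl : c ∈ pos.toList := (List.takeWhile_sublist _).subset hcmem
        have : c ∈ PySem.Chars.strip (PySem.Chars.upper position.toList) := by
          simpa [hpos, PySem.Str.toList_strip, PySem.Str.toList_upper] using hcl
        have hcu : c ∈ PySem.Chars.upper position.toList := (pvStrip_sublist _).subset this
        exact pvUpperFixOfMemUpper hcu
      have hinner : PySem.Str.strip (PySem.Str.upper (String.ofList tw)) = PySem.Str.strip (String.ofList tw) := by
        simp only [PySem.Str.strip, PySem.Str.upper, String.toList_ofList]
        rw [pvUpperEqSelf hupfix]
      -- the segment, stripped, contains no hyphen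
      have hnh : PySem.Str.isIn "-" (PySem.Str.strip (String.ofList tw)) = false := by
        rw [← Bool.not_eq_true, pvIsInHyphenIff]
        intro hmem
        have hmem' : '-' ∈ tw := by
          have : '-' ∈ PySem.Chars.strip tw := by
            simpa [PySem.Str.toList_strip, String.toList_ofList] using hmem
          exact (pvStrip_sublist tw).subset this
        have := List.mem_takeWhile_imp hmem'
        simp at this
      rw [get_position_group_py.eq_def]
      simp only [hinner]
      rw [pvChainElim]
      simp only [hnh, Bool.false_eq_true, if_false]
  · -- no hyphen: a single candidate on both sides
    have hd' : PySem.Str.isIn "-" pos = false := by simpa using hd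
    simp only [hd', Bool.false_eq_true, if_false, pvCandLoop, pvStepEq]

-- ===== VERDICT (by name: the statement is the Claim_ definition above) =====
theorem get_position_group_py_spec : Claim_equal_get_position_group_py := by
  intro position _
  unfold Spec_get_position_group_py
  exact pvMain position
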